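-- pv_equiv track=rewrite | github.com/bfly/aoc2021 | day4/day4.py | check
-- ===== SOURCE A (Python) =====
-- from collections import Counter
--
-- def check(c, marks):        # Check card for 5 in-a-row (ho
--     if not marks:
--         return None
--
--     (_, ch1), = Counter(x // 5 for x in marks).most_common(1)   # Check for vertical 5 in-a-row
--     (_, ch2), = Counter(x % 5  for x in marks).most_common(1)   # Check for horizontal 5 in-a-row
--
--     if ch1 == 5 or ch2 == 5:        # 5 in-a-row found
--         return sum([card for i, card in enumerate(c) if i not in marks])   # Sum unmarked numbers
--
--     return None                     # No 5 in-a-row found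
-- ===== SOURCE B (Python) =====
-- def check(c, marks):        # Check card for 5 in-a-row
--     if not marks:
--         return None
--
--     def longest_run(vals):
--         # sort, then the longest run of equal neighbours is the biggest bucket
--         vals = sorted(vals)
--         best = run = 1
--         for a, b in zip(vals, vals[1:]):
--             run = run + 1 if a == b else 1
--             if run > best:
--                 best = run
--         return best
--
--     if longest_run([x // 5 for x in marks]) != 5 and longest_run([x % 5 for x in marks]) != 5:
--         return None                 # No 5 in-a-row found
--
--     m = set(marks)
--     return sum(x for i, x in enumerate(c) if i not in m)   # Sum unmarked numbers
-- ===== Notes on version B (the rewrite author's own statement) =====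
-- stated objective: alternative
-- what changed: Detects a completed line by sorting the row/column buckets and scanning for the longest run of equal neighbours instead of building Counter frequency tables and taking most_common(1).
import Mathlib
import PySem

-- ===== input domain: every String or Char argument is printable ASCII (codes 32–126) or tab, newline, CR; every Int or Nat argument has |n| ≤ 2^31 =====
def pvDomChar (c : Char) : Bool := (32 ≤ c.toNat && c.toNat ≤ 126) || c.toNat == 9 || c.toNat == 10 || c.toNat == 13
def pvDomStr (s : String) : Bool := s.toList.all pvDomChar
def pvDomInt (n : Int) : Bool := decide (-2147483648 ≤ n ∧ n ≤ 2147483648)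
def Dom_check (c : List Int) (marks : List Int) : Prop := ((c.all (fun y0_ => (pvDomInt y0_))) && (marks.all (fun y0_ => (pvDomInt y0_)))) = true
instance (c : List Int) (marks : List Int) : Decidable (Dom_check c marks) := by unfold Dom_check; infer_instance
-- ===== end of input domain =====

-- B detects a completed line by sorting the row/column buckets and scanning for the longest run of
-- equal neighbours instead of Counter frequency tables (objective: alternative).

-- ===== PORT A =====
-- `(_, ch1), = Counter(...).most_common(1)`: most_common(1) yields the first item of maximal
-- count (only its count ch1/ch2 is then used); `max?` returns the first extremal item.
def check (c : List Int) (marks : List Int) : Option Int :=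
  if marks = [] then none
  else
    let d1 := PySem.Dict.counter (marks.map (fun x => PySem.Int.floordiv x 5))
    let d2 := PySem.Dict.counter (marks.map (fun x => PySem.Int.mod x 5))
    match PySem.List.max? d1.items (fun p => p.2), PySem.List.max? d2.items (fun p => p.2) with
    | some p1, some p2 =>
        if p1.2 = 5 ∨ p2.2 = 5 then
          some ((((PySem.List.enumerate c 0).filter (fun p => !(marks.contains p.1))).map (fun p => p.2)).sum)
        else none
    | _, _ => none   -- unreachable: marks ≠ [] makes both counters nonempty

-- ===== PORT B =====
-- one step of the run scan: state (best, run), pair (a, b) of adjacent sorted values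
def lrStep (s : Int × Int) (p : Int × Int) : Int × Int :=
  let run := if p.1 = p.2 then s.2 + 1 else 1
  (if run > s.1 then run else s.1, run)

-- longest_run: sort, then fold over zip(vals, vals[1:]) (vals[1:] on a list = drop 1, exact)
def longestRun (vals : List Int) : Int :=
  let v := PySem.List.sorted vals (fun x => x) false
  ((v.zip (v.drop 1)).foldl lrStep (1, 1)).1

def check_alt (c : List Int) (marks : List Int) : Option Int :=
  if marks = [] then none
  else if longestRun (marks.map (fun x => PySem.Int.floordiv x 5)) ≠ 5
        ∧ longestRun (marks.map (fun x => PySem.Int.mod x 5)) ≠ 5 then none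
  else
    let m := PySem.Set.ofList marks
    some ((((PySem.List.enumerate c 0).filter (fun p => !(PySem.Set.contains m p.1))).map (fun p => p.2)).sum)

-- ===== PRECONDITION & SPEC =====
def Spec_check (c : List Int) (marks : List Int) (out : Option Int) : Prop := out = check_alt c marks
instance (c : List Int) (marks : List Int) (out : Option Int) : Decidable (Spec_check c marks out) := by unfold Spec_check; infer_instance

-- ===== CLAIM =====
def Claim_equal_check : Prop := ∀ (c : List Int) (marks : List Int), Dom_check c marks → Spec_check c marks (check c marks)

-- ===== LEMMAS AND PROOFS =====

-- consecutive pairs of p ++ [y] are those of p plus (last of p, y)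
theorem zip_drop_append (p : List Int) (y : Int) (h : p ≠ []) :
    (p ++ [y]).zip ((p ++ [y]).drop 1) = p.zip (p.drop 1) ++ [(p.getLast h, y)] := by
  induction p with
  | nil => exact absurd rfl h
  | cons x t ih =>
      cases t with
      | nil => simp
      | cons a t' =>
          have := ih (by simp)
          simp only [List.cons_append, List.drop_one, List.tail_cons] at this ⊢
          simp only [List.zip_cons_cons, this, List.getLast_cons (by simp : a :: t' ≠ [])]
          rfl

-- in a ≤-sorted list every element is at most the last
theorem le_getLast_of_pairwise (p : List Int) (hp : p.Pairwise (· ≤ ·)) (h : p ≠ []) :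
    ∀ v ∈ p, v ≤ p.getLast h := by
  induction p with
  | nil => exact absurd rfl h
  | cons x t ih =>
      intro v hv
      cases t with
      | nil => simp at hv; simp [hv]
      | cons a t' =>
          rw [List.getLast_cons (by simp : a :: t' ≠ [])]
          rcases List.mem_cons.1 hv with rfl | hv'
          · exact le_trans (List.rel_of_pairwise_cons hp (List.getLast_mem _))
              (le_refl _)
          · exact ih (List.Pairwise.of_cons hp) (by simp) v hv'

-- the scan invariant: on a ≤-sorted nonempty list, run = count of the last element,
-- best = the maximal multiplicity (attained by some element)
theorem scan_spec (p : List Int) (hp : p.Pairwise (· ≤ ·)) (h : p ≠ []) :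
    ((p.zip (p.drop 1)).foldl lrStep (1, 1)).2 = (p.count (p.getLast h) : Int)
    ∧ (∃ v ∈ p, ((p.zip (p.drop 1)).foldl lrStep (1, 1)).1 = (p.count v : Int))
    ∧ (∀ v ∈ p, (p.count v : Int) ≤ ((p.zip (p.drop 1)).foldl lrStep (1, 1)).1) := by
  induction p using List.reverseRecOn with
  | nil => exact absurd rfl h
  | append_singleton l y ih =>
      by_cases hl0 : l = []
      · subst hl0; simp
      · have hlne : l ≠ [] := hl0
        have hpl : l.Pairwise (· ≤ ·) := (List.pairwise_append.1 hp).1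
        have hley : ∀ v ∈ l, v ≤ y := by
          intro v hv
          exact (List.pairwise_append.1 hp).2.2 v hv y (by simp)
        obtain ⟨hrun, ⟨v0, hv0mem, hv0⟩, hbound⟩ := ih hpl hlne
        rw [zip_drop_append l y hlne, List.foldl_append]
        have hlast : (l ++ [y]).getLast (by simp) = y := by
          simp
        set st := (l.zip (l.drop 1)).foldl lrStep (1, 1) with hst
        have hbest1 : (1 : Int) ≤ st.1 := by
          have := List.count_pos_iff.2 hv0mem
          omega
        have hstep1 : (List.foldl lrStep st [(l.getLast hlne, y)]).1
            = if (if l.getLast hlne = y then st.2 + 1 else 1) > st.1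
              then (if l.getLast hlne = y then st.2 + 1 else 1) else st.1 := rfl
        have hstep2 : (List.foldl lrStep st [(l.getLast hlne, y)]).2
            = if l.getLast hlne = y then st.2 + 1 else 1 := rfl
        by_cases hey : l.getLast hlne = y
        · -- y extends the final run
          have hcy : ((l ++ [y]).count y : Int) = (l.count y : Int) + 1 := by
            simp [List.count_append]
          have hcyl : (l.count y : Int) = st.2 := by rw [hrun, hey]
          refine ⟨?_, ?_, ?_⟩
          · rw [hlast, hstep2, if_pos hey, hcy, hcyl]
          · by_cases hgt : st.2 + 1 > st.1
            · refine ⟨y, by simp, ?_⟩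
              rw [hstep1, if_pos hey, if_pos hgt, hcy, hcyl]
            · refine ⟨v0, by simp [hv0mem], ?_⟩
              have hvy : v0 ≠ y := by
                intro hvy
                have : (l.count v0 : Int) = st.2 := by rw [hvy, hcyl]
                omega
              rw [hstep1, if_pos hey, if_neg hgt]
              have : ((l ++ [y]).count v0 : Int) = (l.count v0 : Int) := by
                simp [List.count_append, Ne.symm hvy]
              rw [this, hv0]
          · intro v hv
            rw [hstep1, if_pos hey]
            by_cases hvy : v = y
            · subst hvy
              rw [hcy, hcyl]
              split <;> omega
            · have hvl : v ∈ l := by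
                rcases List.mem_append.1 hv with h1 | h1
                · exact h1
                · simp at h1; exact absurd h1 hvy
              have hcv : ((l ++ [y]).count v : Int) = (l.count v : Int) := by
                simp [List.count_append, Ne.symm hvy]
              rw [hcv]
              have := hbound v hvl
              split <;> omega
        · -- y starts a new run; y cannot occur in l
          have hynl : y ∉ l := by
            intro hyl
            exact hey <| (le_antisymm (hley _ (List.getLast_mem _))
              (le_getLast_of_pairwise l hpl hlne y hyl))
          have hcy : ((l ++ [y]).count y : Int) = 1 := by
            simp [List.count_append, List.count_eq_zero_of_not_mem hynl]
          have hng : ¬ ((1 : Int) > st.1) := by omega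
          refine ⟨?_, ?_, ?_⟩
          · rw [hlast, hstep2, if_neg hey, hcy]
          · refine ⟨v0, by simp [hv0mem], ?_⟩
            have hvy : v0 ≠ y := fun hh => hynl (hh ▸ hv0mem)
            rw [hstep1, if_neg hey, if_neg hng]
            have : ((l ++ [y]).count v0 : Int) = (l.count v0 : Int) := by
              simp [List.count_append, Ne.symm hvy]
            rw [this, hv0]
          · intro v hv
            rw [hstep1, if_neg hey, if_neg hng]
            by_cases hvy : v = y
            · subst hvy
              rw [hcy]; omega
            · have hvl : v ∈ l := by
                rcases List.mem_append.1 hv with h1 | h1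
                · exact h1
                · simp at h1; exact absurd h1 hvy
              have hcv : ((l ++ [y]).count v : Int) = (l.count v : Int) := by
                simp [List.count_append, Ne.symm hvy]
              rw [hcv]
              exact hbound v hvl

-- B side: longestRun is the maximal multiplicity, attained
theorem longestRun_spec (xs : List Int) (h : xs ≠ []) :
    (∃ v ∈ xs, longestRun xs = (xs.count v : Int))
    ∧ (∀ v ∈ xs, (xs.count v : Int) ≤ longestRun xs) := by
  set s := PySem.List.sorted xs (fun x => x) false with hs
  have hperm : s.Perm xs := PySem.List.sorted_perm xs (fun x => x) false
  have hsne : s ≠ [] := by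
    intro hh
    exact h (hperm.symm.trans (hh ▸ List.Perm.refl [])).eq_nil
  have hpw : s.Pairwise (· ≤ ·) := by
    have := PySem.List.sorted_pairwise xs (fun x => x)
    simpa using this
  obtain ⟨_, ⟨v0, hv0mem, hv0⟩, hbound⟩ := scan_spec s hpw hsne
  refine ⟨⟨v0, hperm.mem_iff.1 hv0mem, ?_⟩, ?_⟩
  · rw [longestRun, ← hs, hv0, hperm.count_eq]
  · intro v hv
    rw [longestRun, ← hs, ← hperm.count_eq]
    exact hbound v (hperm.mem_iff.2 hv)

-- A side: most_common(1)'s count is the maximal multiplicity, attained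
theorem counter_max_spec (xs : List Int) (h : xs ≠ []) :
    ∃ p, PySem.List.max? (PySem.Dict.counter xs).items (fun q => q.2) = some p
      ∧ (∃ k ∈ xs, p.2 = (xs.count k : Int))
      ∧ (∀ v ∈ xs, (xs.count v : Int) ≤ p.2) := by
  have hitems : (PySem.Dict.counter xs).items
      = (PySem.Set.ofList xs).map (fun k => (k, (xs.count k : Int))) :=
    PySem.Dict.items_counter xs
  have hne : (PySem.Dict.counter xs).items ≠ [] := by
    rw [hitems]
    obtain ⟨x, t, rfl⟩ := List.exists_cons_of_ne_nil h
    have := (PySem.Set.mem_ofList (x :: t) x).2 (by simp)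
    intro hh
    rw [List.map_eq_nil_iff] at hh
    simp [hh] at this
  cases hmax : PySem.List.max? (PySem.Dict.counter xs).items (fun q => q.2) with
  | none => exact absurd ((PySem.List.max?_eq_none_iff _ _).1 hmax) hne
  | some p =>
      refine ⟨p, rfl, ?_, ?_⟩
      · have hpmem := PySem.List.max?_mem hmax
        rw [hitems] at hpmem
        obtain ⟨k, hk, rfl⟩ := List.mem_map.1 hpmem
        exact ⟨k, (PySem.Set.mem_ofList xs k).1 hk, rfl⟩
      · intro v hv
        have hvmem : (v, (xs.count v : Int)) ∈ (PySem.Dict.counter xs).items := by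
          rw [hitems]
          exact List.mem_map.2 ⟨v, (PySem.Set.mem_ofList xs v).2 hv, rfl⟩
        exact PySem.List.max?_isMax hmax _ hvmem

-- the two tests agree
theorem max_eq_longestRun (xs : List Int) (h : xs ≠ []) :
    ∃ p, PySem.List.max? (PySem.Dict.counter xs).items (fun q => q.2) = some p
      ∧ p.2 = longestRun xs := by
  obtain ⟨p, hmax, ⟨k, hk, hpk⟩, hpbound⟩ := counter_max_spec xs h
  obtain ⟨⟨v0, hv0, hlr⟩, hlrbound⟩ := longestRun_spec xs h
  refine ⟨p, hmax, le_antisymm ?_ ?_⟩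
  · rw [hpk]; exact hlrbound k hk
  · rw [hlr]; exact hpbound v0 hv0

-- the two sums agree (set(marks) has the same membership as marks)
theorem sums_eq (c marks : List Int) :
    (((PySem.List.enumerate c 0).filter (fun p => !(marks.contains p.1))).map (fun p => p.2)).sum
    = (((PySem.List.enumerate c 0).filter
          (fun p => !(PySem.Set.contains (PySem.Set.ofList marks) p.1))).map (fun p => p.2)).sum := by
  have : ∀ p : Int × Int, (!(marks.contains p.1)) = (!(PySem.Set.contains (PySem.Set.ofList marks) p.1)) := by
    intro p
    have := PySem.Set.mem_ofList marks p.1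
    simp [PySem.Set.contains, this]
  rw [List.filter_congr (fun p _ => this p)]

theorem check_eq (c marks : List Int) : check c marks = check_alt c marks := by
  by_cases h : marks = []
  · simp [check, check_alt, h]
  · obtain ⟨p1, hm1, he1⟩ := max_eq_longestRun (marks.map (fun x => PySem.Int.floordiv x 5)) (by simp [h])
    obtain ⟨p2, hm2, he2⟩ := max_eq_longestRun (marks.map (fun x => PySem.Int.mod x 5)) (by simp [h])
    simp only [check, check_alt, if_neg h, hm1, hm2]
    by_cases hw : p1.2 = 5 ∨ p2.2 = 5
    · rw [if_pos hw, if_neg (by rw [← he1, ← he2]; tauto)]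
      exact congrArg some (sums_eq c marks)
    · rw [if_neg hw, if_pos (by rw [← he1, ← he2]; tauto)]

-- ===== VERDICT =====
theorem check_spec : Claim_equal_check := by
  intro c marks _
  exact check_eq c marks
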